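-- pv_equiv track=rewrite | github.com/trueMeon/pictex | examples/table/table.py | approximate_column_widths
-- ===== SOURCE A (Python) =====
-- def approximate_column_widths(data_matrix: list) -> list[float]:
--     """
--     Calculates an approximate width for each column based on the longest
--     string in that column, using a simple heuristic.
--     """
--     # These constants can be tweaked for different fonts and font sizes.
--     APPROX_CHAR_WIDTH = 30  # An estimated average width of a character in pixels.
--     HORIZONTAL_PADDING = 24
--
--     num_columns = len(data_matrix[0])
--     max_chars_per_column = [0] * num_columns
--
--     # First, find the maximum number of characters in each column.
--     for row in data_matrix:
--         for i, cell_text in enumerate(row):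
--             if len(cell_text) > max_chars_per_column[i]:
--                 max_chars_per_column[i] = len(cell_text)
--
--     # Now, calculate the approximate pixel width for each column.
--     column_widths = [
--         (count * APPROX_CHAR_WIDTH) + HORIZONTAL_PADDING
--         for count in max_chars_per_column
--     ]
--     return column_widths
-- ===== SOURCE B (Python) =====
-- def approximate_column_widths(data_matrix: list) -> list[float]:
--     APPROX_CHAR_WIDTH = 30
--     HORIZONTAL_PADDING = 24
--     num_columns = len(data_matrix[0])
--     return [
--         max((len(row[i]) for row in data_matrix if i < len(row)), default=0)
--         * APPROX_CHAR_WIDTH + HORIZONTAL_PADDING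
--         for i in range(num_columns)
--     ]
-- ===== Notes on version B (the rewrite author's own statement) =====
-- stated objective: alternative
-- what changed: Replaces the cell-by-cell running-max accumulator over a mutable width list with a direct per-column comprehension (outer loop over column indices, inner max over rows), eliminating the intermediate max_chars_per_column list.
import Mathlib
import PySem

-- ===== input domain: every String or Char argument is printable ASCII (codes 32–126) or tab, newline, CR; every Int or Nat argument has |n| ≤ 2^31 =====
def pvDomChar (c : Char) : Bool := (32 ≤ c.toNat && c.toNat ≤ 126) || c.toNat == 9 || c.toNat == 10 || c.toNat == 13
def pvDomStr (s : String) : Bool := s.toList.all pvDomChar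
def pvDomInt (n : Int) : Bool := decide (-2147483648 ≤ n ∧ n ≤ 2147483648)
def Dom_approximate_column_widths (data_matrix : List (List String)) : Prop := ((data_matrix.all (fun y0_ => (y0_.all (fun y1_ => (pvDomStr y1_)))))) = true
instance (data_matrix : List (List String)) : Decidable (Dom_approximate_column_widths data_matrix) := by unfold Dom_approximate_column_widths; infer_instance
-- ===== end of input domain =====

-- B replaces A's cell-by-cell running-max accumulator list with a direct per-column max (alternative decomposition, same cost).

-- ===== PORT A =====
-- "for i, cell_text in enumerate(row): if len(cell_text) > max_chars_per_column[i]: max_chars_per_column[i] = len(cell_text)"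
def pvRowStep (mc : List Int) (i : Nat) (row : List String) : List Int :=
  match row with
  | [] => mc
  | c :: rest =>
      pvRowStep (if (c.toList.length : Int) > mc.getD i 0 then mc.set i (c.toList.length : Int) else mc) (i + 1) rest

def approximate_column_widths (data_matrix : List (List String)) : List Int :=
  let num_columns := (data_matrix.headD []).length
  let max_chars_per_column := List.replicate num_columns (0 : Int)
  let max_chars_per_column := data_matrix.foldl (fun mc row => pvRowStep mc 0 row) max_chars_per_column
  max_chars_per_column.map (fun count => count * 30 + 24)

-- ===== PORT B =====
-- "max((len(row[i]) for row in data_matrix if i < len(row)), default=0)" (all lengths ≥ 0, so fold from 0)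
def pvColMax (data_matrix : List (List String)) (i : Nat) : Int :=
  data_matrix.foldl (fun m row => if i < row.length then max m ((row.getD i "").toList.length : Int) else m) 0

def approximate_column_widths_alt (data_matrix : List (List String)) : List Int :=
  let num_columns := (data_matrix.headD []).length
  (List.range num_columns).map (fun i => pvColMax data_matrix i * 30 + 24)

-- ===== PRECONDITION & SPEC =====
-- A raises IndexError on an empty matrix (data_matrix[0]) and when some row is longer than the first row.
def Pre_approximate_column_widths (data_matrix : List (List String)) : Prop :=
  data_matrix ≠ [] ∧ ∀ row ∈ data_matrix, row.length ≤ (data_matrix.headD []).length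
instance (data_matrix : List (List String)) : Decidable (Pre_approximate_column_widths data_matrix) := by
  unfold Pre_approximate_column_widths; infer_instance

def pvWitness_approximate_column_widths : List (List String) := [["ab", "c"], ["d"]]

def Spec_approximate_column_widths (data_matrix : List (List String)) (out : List Int) : Prop := out = approximate_column_widths_alt data_matrix
instance (data_matrix : List (List String)) (out : List Int) : Decidable (Spec_approximate_column_widths data_matrix out) := by unfold Spec_approximate_column_widths; infer_instance

-- ===== CLAIM (what is proved, stated in full; the proofs are below) =====
def Claim_equal_approximate_column_widths : Prop := ∀ (data_matrix : List (List String)), Dom_approximate_column_widths data_matrix → Pre_approximate_column_widths data_matrix → Spec_approximate_column_widths data_matrix (approximate_column_widths data_matrix)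

-- ===== LEMMAS AND PROOFS =====

theorem pvRowStep_length (row : List String) (mc : List Int) (i : Nat) :
    (pvRowStep mc i row).length = mc.length := by
  induction row generalizing mc i with
  | nil => rfl
  | cons c rest ih =>
      simp only [pvRowStep]
      rw [ih]
      split <;> simp

theorem pvRowStep_getD (row : List String) (mc : List Int) (i j : Nat)
    (hb : i + row.length ≤ mc.length) :
    (pvRowStep mc i row).getD j 0 =
      if i ≤ j ∧ j < i + row.length then
        max (mc.getD j 0) ((row.getD (j - i) "").toList.length : Int)
      else mc.getD j 0 := by
  induction row generalizing mc i with
  | nil => simp only [pvRowStep, List.length_nil, Nat.add_zero]; rw [if_neg (by omega)]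
  | cons c rest ih =>
      simp only [pvRowStep]
      have hi : i < mc.length := by simp at hb; omega
      rw [ih _ _ (by split <;> simp_all <;> omega)]
      by_cases hj : j = i
      · subst hj
        have h1 : ¬ (j + 1 ≤ j ∧ j < j + 1 + rest.length) := by omega
        have h2 : j ≤ j ∧ j < j + (c :: rest).length := by simp
        rw [if_neg h1, if_pos h2]
        simp only [Nat.sub_self, List.getD_cons_zero]
        split
        · next h =>
            rw [List.getD_eq_getElem?_getD, List.getElem?_set_self hi]
            simp only [Option.getD_some]
            omega
        · next h => omega
      · have hget : (if (c.toList.length : Int) > mc.getD i 0 then mc.set i (c.toList.length : Int) else mc).getD j 0 = mc.getD j 0 := by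
          split
          · rw [List.getD_eq_getElem?_getD, List.getElem?_set_ne (by omega : i ≠ j), ← List.getD_eq_getElem?_getD]
          · rfl
        rw [hget]
        by_cases hc : i + 1 ≤ j ∧ j < i + 1 + rest.length
        · have hc' : i ≤ j ∧ j < i + (c :: rest).length := by simp; omega
          rw [if_pos hc, if_pos hc']
          have h3 : j - i = (j - (i+1)) + 1 := by omega
          simp [h3]
        · have hc' : ¬ (i ≤ j ∧ j < i + (c :: rest).length) := by simp; simp at hc; omega
          rw [if_neg hc, if_neg hc']

theorem pvFold_getD (dm : List (List String)) (mc : List Int) (j : Nat)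
    (hrows : ∀ row ∈ dm, row.length ≤ mc.length) (hj : j < mc.length) :
    (dm.foldl (fun mc row => pvRowStep mc 0 row) mc).getD j 0 =
      dm.foldl (fun m row => if j < row.length then max m ((row.getD j "").toList.length : Int) else m) (mc.getD j 0) := by
  induction dm generalizing mc with
  | nil => rfl
  | cons r rest ih =>
      simp only [List.foldl_cons]
      have hr : r.length ≤ mc.length := hrows r (by simp)
      rw [ih _ (by intro row hrow; rw [pvRowStep_length]; exact hrows row (by simp [hrow]))
            (by rw [pvRowStep_length]; exact hj)]
      rw [pvRowStep_getD r mc 0 j (by omega)]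
      simp only [Nat.zero_le, true_and, Nat.zero_add, Nat.sub_zero]

theorem pvFold_length (dm : List (List String)) (mc : List Int) :
    (dm.foldl (fun mc row => pvRowStep mc 0 row) mc).length = mc.length := by
  induction dm generalizing mc with
  | nil => rfl
  | cons r rest ih => simp only [List.foldl_cons]; rw [ih, pvRowStep_length]

theorem approximate_column_widths_spec : Claim_equal_approximate_column_widths := by
  intro dm _ hpre
  obtain ⟨hne, hrows⟩ := hpre
  unfold Spec_approximate_column_widths approximate_column_widths approximate_column_widths_alt
  simp only
  set n := (dm.headD []).length with hn
  apply List.ext_getElem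
  · simp [pvFold_length]
  · intro j h1 h2
    have hjn : j < n := by simpa [pvFold_length] using h2
    have hlen : (List.replicate n (0 : Int)).length = n := by simp
    simp only [List.getElem_map, List.getElem_range]
    have hfl : (dm.foldl (fun mc row => pvRowStep mc 0 row) (List.replicate n (0:Int))).length = n := by
      rw [pvFold_length]; simp
    have := pvFold_getD dm (List.replicate n (0 : Int)) j
      (by intro row hrow; rw [hlen]; exact hrows row hrow) (by omega)
    rw [List.getD_eq_getElem?_getD, List.getElem?_eq_getElem (by omega), Option.getD_some] at this
    rw [this]
    simp [pvColMax]
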